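-- pv_equiv track=rewrite | github.com/TRANTUAN-PC/Rust_A12_Bypass | Rust-main.py | validate_guid_structure
-- ===== SOURCE A (Python) =====
-- def validate_guid_structure(guid):
--     """Validate GUID conforms to RFC 4122 (version 4, variant 1)"""
--     try:
--         parts = guid.split('-')
--         if len(parts) != 5:
--             return False
--         if not (len(parts[0]) == 8 and len(parts[1]) == len(parts[2]) == len(parts[3]) == 4 and len(parts[4]) == 12):
--             return False
--         hex_chars = set('0123456789ABCDEF')
--         clean = guid.replace('-', '')
--         if not all(c in hex_chars for c in clean):
--             return False
--         # Version must be 4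
--         if parts[2][0] != '4':
--             return False
--         # Variant must be 8/9/A/B
--         if parts[3][0] not in '89AB':
--             return False
--         return True
--     except Exception:
--         return False
-- ===== SOURCE B (Python) =====
-- HEX = '0123456789ABCDEF'
-- PATTERN = 'xxxxxxxx-xxxx-4xxx-yxxx-xxxxxxxxxxxx'
--
-- def _ok(c, p):
--     if p == 'x':
--         return c in HEX
--     if p == 'y':
--         return c in '89AB'
--     return c == p
--
-- def validate_guid_structure(guid):
--     """Validate GUID conforms to RFC 4122 (version 4, variant 1)"""
--     try:
--         if len(guid) != 36:
--             return False
--         return all(_ok(c, p) for c, p in zip(guid, PATTERN))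
--     except Exception:
--         return False
-- ===== Notes on version B (the rewrite author's own statement) =====
-- stated objective: simpler
-- what changed: Replaces split/length-checks/set-membership-scan/positional checks with a single pattern match: length test plus one zip of the string against a 36-character class template (regex-style fullmatch), case-sensitive and anchored.
import Mathlib
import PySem

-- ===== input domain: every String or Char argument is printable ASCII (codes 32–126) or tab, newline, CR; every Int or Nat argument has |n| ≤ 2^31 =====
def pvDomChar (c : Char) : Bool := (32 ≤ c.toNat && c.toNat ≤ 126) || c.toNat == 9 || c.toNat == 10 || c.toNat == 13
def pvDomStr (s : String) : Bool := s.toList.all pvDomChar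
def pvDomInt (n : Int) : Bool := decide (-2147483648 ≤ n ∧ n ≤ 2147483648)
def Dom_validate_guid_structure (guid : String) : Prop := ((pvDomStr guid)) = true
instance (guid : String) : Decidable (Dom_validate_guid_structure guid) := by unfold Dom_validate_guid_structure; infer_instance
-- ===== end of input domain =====

-- B replaces A's split/length-checks/set-scan/positional checks with one anchored match of the
-- string against a 36-character class template (simpler; same return value, same cost class).

-- ===== PORT A =====
def validate_guid_structure (guid : String) : Bool :=
  let cs := guid.toList
  let parts := PySem.Chars.splitOn cs ['-']
  if PySem.List.len parts != 5 then false
  else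
    let p0 := PySem.List.pyGetD parts 0 []
    let p1 := PySem.List.pyGetD parts 1 []
    let p2 := PySem.List.pyGetD parts 2 []
    let p3 := PySem.List.pyGetD parts 3 []
    let p4 := PySem.List.pyGetD parts 4 []
    if !(p0.length == 8 && (p1.length == p2.length && p2.length == p3.length && p3.length == 4) && p4.length == 12) then false
    else
      let hex_chars := PySem.Set.ofList "0123456789ABCDEF".toList
      let clean := PySem.Chars.replace cs ['-'] []
      if !(clean.all (fun c => PySem.Set.contains hex_chars c)) then false
      else
        match PySem.List.pyGet? p2 0 with
        | none => false
        | some c2 =>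
          if c2 != '4' then false
          else
            match PySem.List.pyGet? p3 0 with
            | none => false
            | some c3 =>
              if !(PySem.Chars.isIn [c3] "89AB".toList) then false
              else true


-- ===== PORT B =====
def pvHex : List Char := "0123456789ABCDEF".toList

def pvPattern : List Char := "xxxxxxxx-xxxx-4xxx-yxxx-xxxxxxxxxxxx".toList

def pvOk (c p : Char) : Bool :=
  if p == 'x' then PySem.Chars.isIn [c] pvHex
  else if p == 'y' then PySem.Chars.isIn [c] "89AB".toList
  else c == p

def validate_guid_structure_alt (guid : String) : Bool :=
  let cs := guid.toList
  if cs.length != 36 then false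
  else (cs.zip pvPattern).all (fun cp => pvOk cp.1 cp.2)


-- ===== PRECONDITION & SPEC =====
def Spec_validate_guid_structure (guid : String) (out : Bool) : Prop := out = validate_guid_structure_alt guid
instance (guid : String) (out : Bool) : Decidable (Spec_validate_guid_structure guid out) := by unfold Spec_validate_guid_structure; infer_instance

-- ===== CLAIM (what is proved, stated in full; the proofs are below) =====
def Claim_equal_validate_guid_structure : Prop := ∀ (guid : String), Dom_validate_guid_structure guid → Spec_validate_guid_structure guid (validate_guid_structure guid)

-- ===== LEMMAS AND PROOFS =====

theorem isIn_singleton (c : Char) (l : List Char) : PySem.Chars.isIn [c] l = l.contains c := by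
  by_cases hm : c ∈ l
  · rw [(PySem.Chars.isIn_iff_infix _ _).mpr ((List.singleton_infix_iff c l).mpr hm)]; simp [hm]
  · rw [(PySem.Chars.isIn_eq_false_iff _ _).mpr (fun h => hm ((List.singleton_infix_iff c l).mp h))]
    simp [hm]

def splitSpec : List Char → List Char × List (List Char)
  | [] => ([], [])
  | c :: t =>
    let r := splitSpec t
    if c = '-' then ([], r.1 :: r.2) else (c :: r.1, r.2)

theorem splitOn_go_spec (fuel : Nat) (l cur : List Char) (accs : List (List Char))
    (h : l.length ≤ fuel) :
    PySem.Chars.splitOn.go ['-'] fuel l cur accs =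
      accs.reverse ++ (cur.reverse ++ (splitSpec l).1) :: (splitSpec l).2 := by
  induction fuel generalizing l cur accs with
  | zero =>
    have : l = [] := by simpa using h
    subst this
    simp [PySem.Chars.splitOn.go, splitSpec]
  | succ n ih =>
    cases l with
    | nil => simp [PySem.Chars.splitOn.go, splitSpec]
    | cons c rest =>
      rw [PySem.Chars.splitOn.go]
      by_cases hc : c = '-'
      · subst hc
        simp only [List.isPrefixOf, beq_self_eq_true, Bool.true_and, if_pos]
        rw [ih _ _ _ (by simpa using Nat.lt_succ_iff.mp (Nat.lt_of_lt_of_le (by simp) h))]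
        simp [splitSpec]
      · have hpre : List.isPrefixOf ['-'] (c :: rest) = false := by
          simp [List.isPrefixOf]; exact fun hh => (hc hh.symm).elim
        rw [hpre]
        simp only [Bool.false_eq_true, if_false]
        rw [ih _ _ _ (by simpa using h)]
        simp [splitSpec, hc]

theorem splitOn_eq_splitSpec (cs : List Char) :
    PySem.Chars.splitOn cs ['-'] = (splitSpec cs).1 :: (splitSpec cs).2 := by
  rw [PySem.Chars.splitOn, splitOn_go_spec _ _ _ _ (by omega)]
  simp

theorem replace_go_spec (fuel : Nat) (l acc : List Char) (h : l.length ≤ fuel) :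
    PySem.Chars.replace.go ['-'] [] fuel l acc = acc.reverse ++ l.filter (fun c => !(c == '-')) := by
  induction fuel generalizing l acc with
  | zero =>
    have : l = [] := by simpa using h
    subst this
    simp [PySem.Chars.replace.go]
  | succ n ih =>
    cases l with
    | nil => simp [PySem.Chars.replace.go]
    | cons c rest =>
      rw [PySem.Chars.replace.go]
      by_cases hc : c = '-'
      · subst hc
        simp only [List.isPrefixOf, beq_self_eq_true, Bool.true_and, if_pos]
        rw [ih _ _ (by simpa using h)]
        simp
      · have hpre : List.isPrefixOf ['-'] (c :: rest) = false := by
          simp [List.isPrefixOf]; exact fun hh => (hc hh.symm).elim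
        rw [hpre]
        simp only [Bool.false_eq_true, if_false]
        rw [ih _ _ (by simpa using h)]
        simp [hc]

theorem replace_eq_filter (cs : List Char) :
    PySem.Chars.replace cs ['-'] [] = cs.filter (fun c => !(c == '-')) := by
  rw [PySem.Chars.replace]
  simp only [List.isEmpty_cons, Bool.false_eq_true, if_false]
  rw [replace_go_spec _ _ _ (le_refl _)]
  simp

theorem splitSpec_join (cs : List Char) :
    cs = (splitSpec cs).1 ++ (splitSpec cs).2.flatMap (fun q => '-' :: q) := by
  induction cs with
  | nil => simp [splitSpec]
  | cons c t ih =>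
    by_cases hc : c = '-'
    · subst hc; simp [splitSpec]; exact ih
    · simp [splitSpec, hc]; exact ih

theorem splitSpec_no_dash_parts (cs : List Char) :
    ('-' ∉ (splitSpec cs).1) ∧ ∀ q ∈ (splitSpec cs).2, '-' ∉ q := by
  induction cs with
  | nil => simp [splitSpec]
  | cons c t ih =>
    by_cases hc : c = '-'
    · subst hc
      simp only [splitSpec]
      refine ⟨by simp, ?_⟩
      intro q hq
      rcases List.mem_cons.mp hq with rfl | hq
      · exact ih.1
      · exact ih.2 q hq
    · simp only [splitSpec, if_neg hc]
      refine ⟨?_, ih.2⟩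
      intro hmem
      rcases List.mem_cons.mp hmem with h1 | h1
      · exact hc h1.symm
      · exact ih.1 h1

theorem splitSpec_of_no_dash (a : List Char) (h : '-' ∉ a) : splitSpec a = (a, []) := by
  induction a with
  | nil => simp [splitSpec]
  | cons c t ih =>
    have hc : c ≠ '-' := fun hh => h (hh ▸ List.mem_cons_self ..)
    simp only [splitSpec, if_neg hc]
    rw [ih (fun hh => h (List.mem_cons_of_mem _ hh))]

theorem splitSpec_append (a b : List Char) (h : '-' ∉ a) :
    splitSpec (a ++ '-' :: b) = (a, (splitSpec b).1 :: (splitSpec b).2) := by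
  induction a with
  | nil => simp [splitSpec]
  | cons c t ih =>
    have hc : c ≠ '-' := fun hh => h (hh ▸ List.mem_cons_self ..)
    simp only [List.cons_append, splitSpec, if_neg hc]
    rw [ih (fun hh => h (List.mem_cons_of_mem _ hh))]

theorem pvOk_x (c : Char) : pvOk c 'x' = pvHex.contains c := by
  simp [pvOk, isIn_singleton]

theorem pvOk_y (c : Char) : pvOk c 'y' = ("89AB".toList).contains c := by
  simp [pvOk, isIn_singleton]

theorem pvOk_dash (c : Char) : pvOk c '-' = (c == '-') := by simp [pvOk]

theorem pvOk_four (c : Char) : pvOk c '4' = (c == '4') := by simp [pvOk]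

def allHex (p : List Char) : Bool := p.all (fun c => pvHex.contains c)

def Decomp (cs : List Char) : Prop :=
  ∃ (p0 p1 r2 r3 p4 : List Char) (c3 : Char),
    cs = p0 ++ '-' :: (p1 ++ '-' :: (('4' :: r2) ++ '-' :: ((c3 :: r3) ++ '-' :: p4))) ∧
    p0.length = 8 ∧ p1.length = 4 ∧ r2.length = 3 ∧ r3.length = 3 ∧ p4.length = 12 ∧
    allHex p0 = true ∧ allHex p1 = true ∧ allHex r2 = true ∧
    ("89AB".toList).contains c3 = true ∧ allHex r3 = true ∧ allHex p4 = true

def mtch : List Char → List Char → Bool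
  | c :: cs, p :: ps => pvOk c p && mtch cs ps
  | [], [] => true
  | _, _ => false

theorem mtch_eq_zip (cs pat : List Char) :
    mtch cs pat = (decide (cs.length = pat.length) && (cs.zip pat).all (fun cp => pvOk cp.1 cp.2)) := by
  induction cs generalizing pat with
  | nil => cases pat <;> simp [mtch]
  | cons c t ih =>
    cases pat with
    | nil => simp [mtch]
    | cons p ps =>
      simp only [mtch, ih, List.zip_cons_cons, List.all_cons, List.length_cons]
      by_cases h : t.length = ps.length <;> by_cases h2 : pvOk c p = true <;>
        simp [h, h2]

theorem mtch_nil_iff (cs : List Char) : mtch cs [] = true ↔ cs = [] := by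
  cases cs <;> simp [mtch]

theorem mtch_cons_iff (cs : List Char) (p : Char) (pat : List Char) :
    mtch cs (p :: pat) = true ↔ ∃ c b, cs = c :: b ∧ pvOk c p = true ∧ mtch b pat = true := by
  cases cs with
  | nil => simp [mtch]
  | cons c t => simp [mtch]

theorem mtch_rep_iff (n : Nat) (cs pat : List Char) :
    mtch cs (List.replicate n 'x' ++ pat) = true ↔
      ∃ a b, cs = a ++ b ∧ a.length = n ∧ allHex a = true ∧ mtch b pat = true := by
  induction n generalizing cs with
  | zero =>
    constructor
    · intro h; exact ⟨[], cs, rfl, rfl, rfl, by simpa using h⟩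
    · rintro ⟨a, b, rfl, ha, -, hb⟩
      rw [List.length_eq_zero_iff] at ha; subst ha; simpa using hb
  | succ n ih =>
    cases cs with
    | nil =>
      simp only [List.replicate_succ, List.cons_append, mtch]
      constructor
      · intro h; simp at h
      · rintro ⟨a, b, h, ha, -, -⟩
        have := congrArg List.length h
        simp [ha] at this
        omega
    | cons c t =>
      simp only [List.replicate_succ, List.cons_append, mtch, Bool.and_eq_true, ih]
      constructor
      · rintro ⟨hok, a, b, rfl, ha, hall, hb⟩
        exact ⟨c :: a, b, rfl, by simp [ha], by simp [allHex] at hall ⊢; exact ⟨by simpa [pvOk_x] using hok, hall⟩, hb⟩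
      · rintro ⟨a, b, heq, ha, hall, hb⟩
        cases a with
        | nil => simp at ha
        | cons a0 a' =>
          obtain ⟨rfl, rfl⟩ : a0 = c ∧ a' ++ b = t := by
            constructor <;> [exact (List.cons.injEq .. ▸ heq).1.symm; exact ((List.cons.injEq ..).mp heq).2.symm]
          refine ⟨?_, a', b, rfl, by simpa using ha, ?_, hb⟩
          · simp [allHex] at hall; simpa [pvOk_x] using hall.1
          · simp [allHex] at hall ⊢; exact hall.2

theorem pattern_shape : pvPattern =
    List.replicate 8 'x' ++ '-' :: (List.replicate 4 'x' ++ '-' :: ('4' ::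
      (List.replicate 3 'x' ++ '-' :: ('y' ::
        (List.replicate 3 'x' ++ '-' :: (List.replicate 12 'x' ++ ([] : List Char))))))) := by
  decide

theorem B_iff (cs : List Char) : mtch cs pvPattern = true ↔ Decomp cs := by
  rw [pattern_shape]
  simp only [mtch_rep_iff, mtch_cons_iff, mtch_nil_iff, pvOk_dash, pvOk_four, pvOk_y, beq_iff_eq]
  constructor
  · rintro ⟨p0, _, rfl, h8, hx0, _, _, rfl, rfl, p1, _, rfl, h4, hx1, _, _, rfl, rfl,
      _, _, rfl, rfl, r2, _, rfl, h3, hx2, _, _, rfl, rfl, c3, _, rfl, h89,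
      r3, _, rfl, h3', hx3, _, _, rfl, rfl, p4, _, rfl, h12, hx4, rfl⟩
    exact ⟨p0, p1, r2, r3, p4, c3, by simp, h8, h4, h3, h3', h12, hx0, hx1, hx2, h89, hx3, hx4⟩
  · rintro ⟨p0, p1, r2, r3, p4, c3, rfl, h8, h4, h3, h3', h12, hx0, hx1, hx2, h89, hx3, hx4⟩
    exact ⟨p0, _, rfl, h8, hx0, '-', _, rfl, rfl, p1, _, rfl, h4, hx1, '-', _, rfl, rfl,
      '4', _, rfl, rfl, r2, _, rfl, h3, hx2, '-', _, rfl, rfl, c3, _, rfl, h89,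
      r3, _, rfl, h3', hx3, '-', _, rfl, rfl, p4, [], by simp, h12, hx4, rfl⟩

theorem Balt_eq_mtch (guid : String) :
    validate_guid_structure_alt guid = mtch guid.toList pvPattern := by
  rw [mtch_eq_zip]
  have hp : pvPattern.length = 36 := by decide
  by_cases h : guid.toList.length = 36 <;>
    simp [validate_guid_structure_alt, h, hp]

theorem hex_set_contains (c : Char) :
    PySem.Set.contains (PySem.Set.ofList "0123456789ABCDEF".toList) c = pvHex.contains c := by
  have h : PySem.Set.ofList "0123456789ABCDEF".toList = pvHex := by decide
  rw [h]
  simp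

theorem len4 (l : List (List Char)) (h : l.length = 4) : ∃ a b c d, l = [a, b, c, d] := by
  rcases l with _ | ⟨a, _ | ⟨b, _ | ⟨c, _ | ⟨d, _ | ⟨e, t⟩⟩⟩⟩⟩ <;> simp at h
  exact ⟨a, b, c, d, rfl⟩

theorem no_dash_of_allHex {p : List Char} (h : allHex p = true) : '-' ∉ p := by
  intro hm
  have := List.all_eq_true.mp h _ hm
  simp [pvHex] at this

theorem hex_of_89AB {c : Char} (h : ("89AB".toList).contains c = true) : pvHex.contains c = true := by
  have e : "89AB".toList = ['8', '9', 'A', 'B'] := rfl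
  rw [e] at h
  simp at h
  rcases h with rfl | rfl | rfl | rfl <;> decide

theorem filter_no_dash {p : List Char} (h : '-' ∉ p) : p.filter (fun c => !(c == '-')) = p := by
  apply List.filter_eq_self.mpr
  intro c hc
  simp only [bne_iff_ne, ne_eq, Bool.not_eq_eq_eq_not, Bool.not_true, beq_eq_false_iff_ne]
  exact fun e => h (e ▸ hc)

theorem A_iff (guid : String) : validate_guid_structure guid = true ↔ Decomp guid.toList := by
  show (let cs := guid.toList
    let parts := PySem.Chars.splitOn cs ['-']
    if PySem.List.len parts != 5 then false
    else
      let p0 := PySem.List.pyGetD parts 0 []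
      let p1 := PySem.List.pyGetD parts 1 []
      let p2 := PySem.List.pyGetD parts 2 []
      let p3 := PySem.List.pyGetD parts 3 []
      let p4 := PySem.List.pyGetD parts 4 []
      if !(p0.length == 8 && (p1.length == p2.length && p2.length == p3.length && p3.length == 4) && p4.length == 12) then false
      else
        let hex_chars := PySem.Set.ofList "0123456789ABCDEF".toList
        let clean := PySem.Chars.replace cs ['-'] []
        if !(clean.all (fun c => PySem.Set.contains hex_chars c)) then false
        else
          match PySem.List.pyGet? p2 0 with
          | none => false
          | some c2 =>
            if c2 != '4' then false
            else
              match PySem.List.pyGet? p3 0 with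
              | none => false
              | some c3 =>
                if !(PySem.Chars.isIn [c3] "89AB".toList) then false
                else true) = true ↔ Decomp guid.toList
  simp only []
  generalize guid.toList = cs
  rw [splitOn_eq_splitSpec]
  constructor
  · intro h
    have hlen5 : (splitSpec cs).2.length = 4 := by
      by_contra hne
      have hc : (PySem.List.len ((splitSpec cs).1 :: (splitSpec cs).2) != 5) = true := by
        simp [PySem.List.len_eq]; omega
      rw [if_pos hc] at h; exact absurd h (by simp)
    obtain ⟨q1, q2, q3, q4, hnil⟩ := len4 _ hlen5
    rw [hnil] at h
    rw [if_neg (by simp [PySem.List.len_eq])] at h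
    have e0 : PySem.List.pyGetD ((splitSpec cs).1 :: [q1, q2, q3, q4]) 0 [] = (splitSpec cs).1 := rfl
    have e1 : PySem.List.pyGetD ((splitSpec cs).1 :: [q1, q2, q3, q4]) 1 [] = q1 := rfl
    have e2 : PySem.List.pyGetD ((splitSpec cs).1 :: [q1, q2, q3, q4]) 2 [] = q2 := rfl
    have e3 : PySem.List.pyGetD ((splitSpec cs).1 :: [q1, q2, q3, q4]) 3 [] = q3 := rfl
    have e4 : PySem.List.pyGetD ((splitSpec cs).1 :: [q1, q2, q3, q4]) 4 [] = q4 := rfl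
    rw [e0, e1, e2, e3, e4] at h
    by_cases hL : ((splitSpec cs).1.length == 8 && (q1.length == q2.length && q2.length == q3.length && q3.length == 4) && q4.length == 12) = true
    case neg =>
      rw [if_pos (by simp at hL ⊢; tauto)] at h
      exact absurd h (by simp)
    rw [if_neg (by simp [hL])] at h
    by_cases hHex : ((PySem.Chars.replace cs ['-'] []).all fun c => (PySem.Set.ofList "0123456789ABCDEF".toList).contains c) = true
    case neg =>
      rw [if_pos (by simp at hHex ⊢; exact hHex)] at h
      exact absurd h (by simp)
    rw [if_neg (by rw [hHex]; simp)] at h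
    rcases hq2 : PySem.List.pyGet? q2 0 with _ | c2 <;> rw [hq2] at h
    · simp at h
    by_cases hc2 : (c2 != '4') = true
    · simp [hc2] at h
    rw [Bool.not_eq_true] at hc2
    rcases hq3 : PySem.List.pyGet? q3 0 with _ | c3
    · simp [hc2, hq3] at h
    by_cases hIn : PySem.Chars.isIn [c3] "89AB".toList = true
    case neg =>
      rw [Bool.not_eq_true] at hIn
      simp [hc2, hq3] at h
      have e89 : ("89AB".toList) = ['8', '9', 'A', 'B'] := rfl
      rw [e89] at hIn
      exact absurd h (by simp [hIn])
    -- collected: build the decomposition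
    have hc2' : c2 = '4' := by simpa using hc2
    subst hc2'
    have h89 : ("89AB".toList).contains c3 = true := by rw [← isIn_singleton]; exact hIn
    simp only [Bool.and_eq_true, beq_iff_eq] at hL
    obtain ⟨⟨h8, ⟨⟨h12', h23'⟩, h34⟩⟩, hq4len⟩ := hL
    obtain ⟨a2, t2, rfl⟩ : ∃ a t, q2 = a :: t := by
      cases q2 with
      | nil => simp [PySem.List.pyGet?, PySem.List.pyIdx?] at hq2
      | cons a t => exact ⟨a, t, rfl⟩
    obtain ⟨a3, t3, rfl⟩ : ∃ a t, q3 = a :: t := by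
      cases q3 with
      | nil => simp [PySem.List.pyGet?, PySem.List.pyIdx?] at hq3
      | cons a t => exact ⟨a, t, rfl⟩
    have ha2 : a2 = '4' := by
      rw [PySem.List.pyGet?_zero_cons] at hq2; exact Option.some.inj hq2
    have ha3 : a3 = c3 := by
      rw [PySem.List.pyGet?_zero_cons] at hq3; exact Option.some.inj hq3
    subst ha2
    rw [← ha3] at h89
    -- membership of part characters in cs
    have hj := splitSpec_join cs
    rw [hnil] at hj
    have hnd := splitSpec_no_dash_parts cs
    rw [hnil] at hnd
    have hsub : ∀ c : Char, c ∈ (splitSpec cs).1 ∨ c ∈ q1 ∨ c ∈ ('4' :: t2) ∨ c ∈ (a3 :: t3) ∨ c ∈ q4 → c ∈ cs := by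
      intro c hc
      rw [hj]
      simp only [List.flatMap_cons, List.flatMap_nil, List.append_nil, List.mem_append, List.mem_cons]
      simp only [List.mem_cons] at hc
      tauto
    have hclean : ∀ c ∈ cs, ¬c = '-' → pvHex.contains c = true := by
      intro c hc hcd
      have hmem : c ∈ PySem.Chars.replace cs ['-'] [] := by
        rw [replace_eq_filter]
        exact List.mem_filter.mpr ⟨hc, by simpa using hcd⟩
      have := List.all_eq_true.mp hHex c hmem
      rwa [hex_set_contains] at this
    have hexOf : ∀ (q : List Char), (∀ c ∈ q, c ∈ cs) → ('-' ∉ q) → allHex q = true := by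
      intro q hq hndq
      apply List.all_eq_true.mpr
      intro c hc
      exact hclean c (hq c hc) (fun he => hndq (he ▸ hc))
    have m1 : q1 ∈ [q1, '4' :: t2, a3 :: t3, q4] := by simp
    have m2 : ('4' :: t2) ∈ [q1, '4' :: t2, a3 :: t3, q4] := by simp
    have m3 : (a3 :: t3) ∈ [q1, '4' :: t2, a3 :: t3, q4] := by simp
    have m4 : q4 ∈ [q1, '4' :: t2, a3 :: t3, q4] := by simp
    simp only [List.length_cons] at h12' h23' h34
    refine ⟨(splitSpec cs).1, q1, t2, t3, q4, a3, ?_, h8, ?_, ?_, ?_, hq4len, ?_, ?_, ?_, h89, ?_, ?_⟩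
    · conv_lhs => rw [hj]
      simp
    · omega
    · omega
    · omega
    · exact hexOf _ (fun c hc => hsub c (Or.inl hc)) hnd.1
    · exact hexOf _ (fun c hc => hsub c (Or.inr (Or.inl hc))) (hnd.2 q1 m1)
    · have := hexOf _ (fun c hc => hsub c (Or.inr (Or.inr (Or.inl hc)))) (hnd.2 _ m2)
      simp [allHex] at this ⊢
      exact this.2
    · have := hexOf _ (fun c hc => hsub c (Or.inr (Or.inr (Or.inr (Or.inl hc))))) (hnd.2 _ m3)
      simp [allHex] at this ⊢
      exact this.2
    · exact hexOf _ (fun c hc => hsub c (Or.inr (Or.inr (Or.inr (Or.inr hc))))) (hnd.2 q4 m4)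
  · rintro ⟨p0, p1, r2, r3, p4, c3, rfl, h8, h4, h3, h3', h12, hx0, hx1, hx2, h89, hx3, hx4⟩
    have nd0 : '-' ∉ p0 := no_dash_of_allHex hx0
    have nd1 : '-' ∉ p1 := no_dash_of_allHex hx1
    have nd2 : '-' ∉ ('4' :: r2) := by
      intro hm
      rcases List.mem_cons.mp hm with hz | hz
      · exact absurd hz (by decide)
      · exact no_dash_of_allHex hx2 hz
    have nd3 : '-' ∉ (c3 :: r3) := by
      intro hm
      rcases List.mem_cons.mp hm with hz | hz
      · rw [← hz] at h89; exact absurd h89 (by decide)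
      · exact no_dash_of_allHex hx3 hz
    have nd4 : '-' ∉ p4 := no_dash_of_allHex hx4
    have hsplit : splitSpec (p0 ++ '-' :: (p1 ++ '-' :: (('4' :: r2) ++ '-' :: ((c3 :: r3) ++ '-' :: p4)))) = (p0, [p1, '4' :: r2, c3 :: r3, p4]) := by
      rw [splitSpec_append _ _ nd0, splitSpec_append _ _ nd1, splitSpec_append _ _ nd2,
        splitSpec_append _ _ nd3, splitSpec_of_no_dash _ nd4]
    rw [hsplit]
    have e0 : PySem.List.pyGetD ((p0, [p1, '4' :: r2, c3 :: r3, p4]).1 :: (p0, [p1, '4' :: r2, c3 :: r3, p4]).2) 0 [] = p0 := rfl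
    have e1 : PySem.List.pyGetD ((p0, [p1, '4' :: r2, c3 :: r3, p4]).1 :: (p0, [p1, '4' :: r2, c3 :: r3, p4]).2) 1 [] = p1 := rfl
    have e2 : PySem.List.pyGetD ((p0, [p1, '4' :: r2, c3 :: r3, p4]).1 :: (p0, [p1, '4' :: r2, c3 :: r3, p4]).2) 2 [] = '4' :: r2 := rfl
    have e3 : PySem.List.pyGetD ((p0, [p1, '4' :: r2, c3 :: r3, p4]).1 :: (p0, [p1, '4' :: r2, c3 :: r3, p4]).2) 3 [] = c3 :: r3 := rfl
    have e4 : PySem.List.pyGetD ((p0, [p1, '4' :: r2, c3 :: r3, p4]).1 :: (p0, [p1, '4' :: r2, c3 :: r3, p4]).2) 4 [] = p4 := rfl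
    rw [e0, e1, e2, e3, e4]
    rw [if_neg (by simp [PySem.List.len_eq])]
    rw [if_neg (by simp [h8, h4, h3, h3', h12])]
    rw [if_neg ?hexgoal]
    case hexgoal =>
      rw [replace_eq_filter]
      simp only [List.filter_append, List.filter_cons, filter_no_dash nd0, filter_no_dash nd1,
        filter_no_dash nd2, filter_no_dash nd3, filter_no_dash nd4]
      simp only [beq_self_eq_true, Bool.not_true, Bool.false_eq_true, if_false]
      have c4hex : pvHex.contains '4' = true := by decide
      have c3hex : pvHex.contains c3 = true := hex_of_89AB h89
      simp only [allHex] at hx0 hx1 hx2 hx3 hx4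
      have hfun : (fun c => (PySem.Set.ofList "0123456789ABCDEF".toList).contains c) = (fun c : Char => pvHex.contains c) :=
        funext hex_set_contains
      rw [hfun]
      simp only [List.all_append, List.all_cons, hx0, hx1, hx2, hx3, hx4, c4hex, c3hex]
      simp
    rw [PySem.List.pyGet?_zero_cons]
    have h89' : c3 = '8' ∨ c3 = '9' ∨ c3 = 'A' ∨ c3 = 'B' := by
      have e : "89AB".toList = ['8', '9', 'A', 'B'] := rfl
      rw [e] at h89; simpa using h89
    simp [isIn_singleton, h89']

theorem main_eq (guid : String) : validate_guid_structure guid = validate_guid_structure_alt guid := by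
  rw [Balt_eq_mtch]
  exact Bool.eq_iff_iff.mpr ((A_iff guid).trans (B_iff guid.toList).symm)


-- ===== VERDICT (by name: the statement is the Claim_ definition above) =====
theorem validate_guid_structure_spec : Claim_equal_validate_guid_structure := by
  intro guid _
  unfold Spec_validate_guid_structure
  exact main_eq guid
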